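-- pv_equiv track=rewrite | github.com/bretgourdie/weakness-subset | weakness-subset.py | calculateTypeMatrix
-- ===== SOURCE A (Python) =====
-- def calculateTypeMatrix(dRanked):
--     dTypeMatrix = {}
--
--     for sPoke, lTypes in dRanked.items():
--         for tScoreByType in lTypes:
--             sType, iScore = tScoreByType
--
--             if sType not in dTypeMatrix:
--                 dTypeMatrix[sType] = 1
--
--             dTypeMatrix[sType] *= iScore
--
--     return dTypeMatrix
-- ===== SOURCE B (Python) =====
-- def calculateTypeMatrix(dRanked):
--     dScoresByType = {}
--     for sPoke, lTypes in dRanked.items():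
--         for sType, iScore in lTypes:
--             dScoresByType.setdefault(sType, []).append(iScore)
--     return {sType: _product(lScores) for sType, lScores in dScoresByType.items()}
--
--
-- def _product(lScores):
--     iProduct = 1
--     for iScore in lScores:
--         iProduct *= iScore
--     return iProduct
-- ===== Notes on version B (the rewrite author's own statement) =====
-- stated objective: alternative
-- what changed: Replaces the in-loop running product with a two-phase collect-then-fold: first group all scores per type in encounter order, then reduce each group to its product in a separate pass.
import Mathlib
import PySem

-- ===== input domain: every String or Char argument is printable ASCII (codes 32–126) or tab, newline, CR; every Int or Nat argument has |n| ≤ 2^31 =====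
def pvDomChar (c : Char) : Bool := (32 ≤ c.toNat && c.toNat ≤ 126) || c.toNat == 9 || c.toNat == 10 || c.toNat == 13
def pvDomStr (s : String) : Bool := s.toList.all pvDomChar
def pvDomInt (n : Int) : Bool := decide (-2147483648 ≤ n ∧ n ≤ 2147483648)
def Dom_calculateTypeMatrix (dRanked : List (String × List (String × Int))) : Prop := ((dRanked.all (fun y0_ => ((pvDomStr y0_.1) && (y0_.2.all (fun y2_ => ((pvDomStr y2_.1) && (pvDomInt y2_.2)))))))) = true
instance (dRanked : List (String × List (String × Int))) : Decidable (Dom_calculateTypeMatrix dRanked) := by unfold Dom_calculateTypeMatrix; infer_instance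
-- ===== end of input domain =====

-- B replaces A's in-loop running product with a two-phase collect-then-fold (group scores per type, then reduce each group); alternative decomposition, same cost.


-- ===== PORT A =====
-- one step of A's inner loop: ensure the key is present (with 1), then 'dTypeMatrix[sType] *= iScore'
-- (the modify default 1 is never consulted: the key was just ensured present, where Python's d[k] *= s succeeds)
def pvStepA (d : PySem.Dict String Int) (p : String × Int) : PySem.Dict String Int :=
  (if d.contains p.1 then d else d.insert p.1 1).modify p.1 1 (· * p.2)

def calculateTypeMatrix (dRanked : List (String × List (String × Int))) : List (String × Int) :=
  (dRanked.foldl (fun d poke => poke.2.foldl pvStepA d) PySem.Dict.empty).items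

-- ===== PORT B =====
-- port of Source B's _product: left fold with accumulator 1
def pvProduct (lScores : List Int) : Int := lScores.foldl (fun r x => r * x) 1

-- 'dScoresByType.setdefault(sType, []).append(iScore)' = modify with default []
def pvStepG (g : PySem.Dict String (List Int)) (p : String × Int) : PySem.Dict String (List Int) :=
  g.modify p.1 [] (· ++ [p.2])

def calculateTypeMatrix_alt (dRanked : List (String × List (String × Int))) : List (String × Int) :=
  let groups := dRanked.foldl (fun g poke => poke.2.foldl pvStepG g) PySem.Dict.empty
  groups.items.map (fun p => (p.1, pvProduct p.2))

-- ===== PRECONDITION & SPEC =====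
def Spec_calculateTypeMatrix (dRanked : List (String × List (String × Int))) (out : List (String × Int)) : Prop := out = calculateTypeMatrix_alt dRanked
instance (dRanked : List (String × List (String × Int))) (out : List (String × Int)) : Decidable (Spec_calculateTypeMatrix dRanked out) := by unfold Spec_calculateTypeMatrix; infer_instance

-- ===== CLAIM (what is proved, stated in full; the proofs are below) =====
def Claim_equal_calculateTypeMatrix : Prop := ∀ (dRanked : List (String × List (String × Int))), Dom_calculateTypeMatrix dRanked → Spec_calculateTypeMatrix dRanked (calculateTypeMatrix dRanked)

-- ===== LEMMAS AND PROOFS =====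

-- map each group to its product (the relation A's accumulator keeps with B's)
def pvMapProd (g : PySem.Dict String (List Int)) : PySem.Dict String Int :=
  PySem.Dict.mk (g.items.map (fun p => (p.1, pvProduct p.2)))

theorem pvFind_map (L : List (String × List Int)) (t : String) :
    List.find? (fun p => p.1 == t) (L.map (fun p => (p.1, pvProduct p.2)))
      = (List.find? (fun p => p.1 == t) L).map (fun p => (p.1, pvProduct p.2)) := by
  induction L with
  | nil => rfl
  | cons a L ih =>
    by_cases h : a.1 = t <;> simp [h, ih]

theorem pvContains_mapProd (g : PySem.Dict String (List Int)) (t : String) :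
    (pvMapProd g).contains t = g.contains t := by
  show (g.items.map (fun p => (p.1, pvProduct p.2))).any (fun p => p.1 == t) = _
  rw [List.any_map]
  rfl

theorem pvGet?_mapProd (g : PySem.Dict String (List Int)) (t : String) :
    (pvMapProd g).get? t = (g.get? t).map pvProduct := by
  simp only [pvMapProd, PySem.Dict.get?, pvFind_map, Option.map_map]
  rfl

theorem pvProduct_append_singleton (l : List Int) (s : Int) :
    pvProduct (l ++ [s]) = pvProduct l * s := by
  simp [pvProduct, List.foldl_append]

theorem pvInsert_mapProd (g : PySem.Dict String (List Int)) (t : String) (l : List Int) :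
    (pvMapProd g).insert t (pvProduct l) = pvMapProd (g.insert t l) := by
  apply PySem.Dict.ext
  by_cases h : g.contains t = true
  · have hc : (pvMapProd g).contains t = true := by rw [pvContains_mapProd]; exact h
    rw [PySem.Dict.items_insert_of_contains _ _ hc]
    have : (g.insert t l).items = g.items.map (fun p => if p.1 == t then (t, l) else p) :=
      PySem.Dict.items_insert_of_contains _ _ h
    simp only [pvMapProd, this, List.map_map]
    apply List.map_congr_left
    intro a _
    by_cases ha : a.1 = t <;> simp [Function.comp, ha]
  · have h' : g.contains t = false := by simpa using h
    have hc : (pvMapProd g).contains t = false := by rw [pvContains_mapProd]; exact h'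
    rw [PySem.Dict.items_insert_of_not_contains _ _ hc]
    have : (g.insert t l).items = g.items ++ [(t, l)] :=
      PySem.Dict.items_insert_of_not_contains _ _ h'
    simp [pvMapProd, this]

theorem pvStep_comm (g : PySem.Dict String (List Int)) (p : String × Int) :
    pvStepA (pvMapProd g) p = pvMapProd (pvStepG g p) := by
  obtain ⟨t, s⟩ := p
  by_cases h : g.contains t = true
  · -- key already present: both sides overwrite the value at t in place
    have hc : (pvMapProd g).contains t = true := by rw [pvContains_mapProd]; exact h
    obtain ⟨l, hl⟩ : ∃ l, g.get? t = some l := by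
      have := PySem.Dict.contains_eq_isSome_get? g t
      rcases ho : g.get? t with _ | l
      · rw [ho] at this; simp [h] at this
      · exact ⟨l, rfl⟩
    have e1 : pvStepA (pvMapProd g) (t, s) = (pvMapProd g).insert t (pvProduct l * s) := by
      simp [pvStepA, PySem.Dict.modify, hc, PySem.Dict.getD, pvGet?_mapProd, hl]
    have e2 : pvStepG g (t, s) = g.insert t (l ++ [s]) := by
      simp [pvStepG, PySem.Dict.modify, PySem.Dict.getD, hl]
    rw [e1, e2, ← pvProduct_append_singleton, pvInsert_mapProd]
  · -- fresh key: both sides append a new entry at the end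
    have h' : g.contains t = false := by simpa using h
    have hc : (pvMapProd g).contains t = false := by rw [pvContains_mapProd]; exact h'
    have e1 : pvStepA (pvMapProd g) (t, s) = ((pvMapProd g).insert t 1).insert t (1 * s) := by
      simp [pvStepA, PySem.Dict.modify, hc, PySem.Dict.getD, PySem.Dict.get?_insert_self]
    have e2 : pvStepG g (t, s) = g.insert t ([s]) := by
      have : g.getD t [] = [] := PySem.Dict.getD_of_not_contains _ _ h'
      simp [pvStepG, PySem.Dict.modify, this]
    rw [e1, e2, PySem.Dict.insert_insert_self]
    have : (1 : Int) * s = pvProduct [s] := by simp [pvProduct]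
    rw [this, pvInsert_mapProd]

theorem pvFold_comm (pairs : List (String × Int)) (g : PySem.Dict String (List Int)) :
    pairs.foldl pvStepA (pvMapProd g) = pvMapProd (pairs.foldl pvStepG g) := by
  induction pairs generalizing g with
  | nil => rfl
  | cons p pairs ih => simp [List.foldl_cons, pvStep_comm, ih]

theorem pvOuter_comm (dRanked : List (String × List (String × Int))) (g : PySem.Dict String (List Int)) :
    dRanked.foldl (fun d poke => poke.2.foldl pvStepA d) (pvMapProd g)
      = pvMapProd (dRanked.foldl (fun d poke => poke.2.foldl pvStepG d) g) := by
  induction dRanked generalizing g with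
  | nil => rfl
  | cons poke rest ih => simp [List.foldl_cons, pvFold_comm, ih]

-- ===== VERDICT (by name: the statement is the Claim_ definition above) =====
theorem calculateTypeMatrix_spec : Claim_equal_calculateTypeMatrix := by
  intro dRanked _
  show calculateTypeMatrix dRanked = calculateTypeMatrix_alt dRanked
  unfold calculateTypeMatrix calculateTypeMatrix_alt
  have h0 : (PySem.Dict.empty : PySem.Dict String Int) = pvMapProd PySem.Dict.empty := rfl
  rw [h0, pvOuter_comm]
  rfl
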